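-- pv_equiv track=rewrite | github.com/lexasy/DA_labs | lab7/test_generator.py | min_penalty_path_with_trace
-- ===== SOURCE A (Python) =====
-- def min_penalty_path_with_trace(A):
--     n = len(A)
--     m = len(A[0])
--
--     dp = [[float('inf')] * m for _ in range(n)]
--     prev = [[-1] * m for _ in range(n)]
--
--     for j in range(m):
--         dp[0][j] = A[0][j]
--
--     for i in range(1, n):
--         for j in range(m):
--             for k in range(max(0, j-1), min(m, j+2)):
--                 if dp[i-1][k] + A[i][j] < dp[i][j]:
--                     dp[i][j] = dp[i-1][k] + A[i][j]
--                     prev[i][j] = k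
--
--     min_penalty = min(dp[n-1])
--     min_index = dp[n-1].index(min_penalty)
--
--     path = []
--     current_row = n - 1
--     current_col = min_index
--
--     while current_row >= 0:
--         path.append((current_row + 1, current_col + 1))
--         current_col = prev[current_row][current_col]
--         current_row -= 1
--
--     path.reverse()
--
--     return min_penalty, path
-- ===== SOURCE B (Python) =====
-- def min_penalty_path_with_trace(A):
--     n = len(A)
--     m = len(A[0])
--
--     dp = [list(A[0])]
--     for i in range(1, n):
--         prev_row = dp[-1]
--         dp.append([A[i][j] + min(prev_row[k] for k in range(max(0, j - 1), min(m, j + 2)))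
--                    for j in range(m)])
--
--     min_penalty = min(dp[-1])
--     j = dp[-1].index(min_penalty)
--
--     path = [(n, j + 1)]
--     for i in range(n - 1, 0, -1):
--         target = dp[i][j] - A[i][j]
--         for k in range(max(0, j - 1), min(m, j + 2)):
--             if dp[i - 1][k] == target:
--                 j = k
--                 break
--         path.append((i, j + 1))
--     path.reverse()
--     return min_penalty, path
-- ===== Notes on version B (the rewrite author's own statement) =====
-- stated objective: simpler
-- what changed: B drops A's prev-pointer table and float('inf') sentinels entirely: it fills the dp table row by row as a window-minimum recurrence and reconstructs the path by rescanning dp backwards for the first matching predecessor, instead of recording and following prev pointers.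
import Mathlib
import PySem

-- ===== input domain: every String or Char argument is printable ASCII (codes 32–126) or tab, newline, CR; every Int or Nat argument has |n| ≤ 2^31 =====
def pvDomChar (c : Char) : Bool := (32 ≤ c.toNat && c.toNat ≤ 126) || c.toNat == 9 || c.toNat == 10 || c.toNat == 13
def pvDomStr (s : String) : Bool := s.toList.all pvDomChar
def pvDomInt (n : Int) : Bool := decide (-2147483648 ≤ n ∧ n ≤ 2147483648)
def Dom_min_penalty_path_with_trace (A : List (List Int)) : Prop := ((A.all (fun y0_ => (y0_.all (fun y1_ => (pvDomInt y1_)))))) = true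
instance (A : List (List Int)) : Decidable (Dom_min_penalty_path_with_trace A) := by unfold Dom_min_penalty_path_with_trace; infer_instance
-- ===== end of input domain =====

-- B drops A's prev table and float('inf') sentinels: it fills the same dp values row by row with
-- a window minimum, and reconstructs the path by rescanning dp — simpler, no inf, no prev table.
-- (A also never mutates its argument; equivalence is about the return value.)

-- ===== PORT A =====
-- float('inf') is modelled as `none`: `pvLtInf` is Python's `<` with none = +inf,
-- `pvAddInf` is `inf + a = inf`.
def pvAddInf (x : Option Int) (a : Int) : Option Int := x.map (· + a)

def pvLtInf : Option Int → Option Int → Bool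
  | none, _ => false
  | some _, none => true
  | some u, some v => decide (u < v)

-- the inner k-loop of A computing dp[i][j] and prev[i][j] (dp[i][j] starts at inf, prev at -1)
def pvCellA (dprev : List (Option Int)) (m a j : Int) : Option Int × Int :=
  (PySem.List.pyRange (max 0 (j - 1)) (min m (j + 2)) 1).foldl
    (fun st k =>
      let cand := pvAddInf (PySem.List.pyGetD dprev k none) a
      if pvLtInf cand st.1 then (cand, k) else st)
    (none, -1)

-- the j-loop for row i (dp row, prev row)
def pvRowA (dprev : List (Option Int)) (rowi : List Int) (m : Int) :
    List (Option Int) × List Int :=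
  let cells := (PySem.List.pyRange 0 m 1).map
    (fun j => pvCellA dprev m (PySem.List.pyGetD rowi j 0) j)
  (cells.map Prod.fst, cells.map Prod.snd)

-- the i-loop: dp and prev tables (rows 0..n-1; untouched inf/-1 rows beyond are never read)
def pvTablesA (A : List (List Int)) (n m : Int) :
    List (List (Option Int)) × List (List Int) :=
  let dp0 := (PySem.List.pyRange 0 m 1).map
    (fun j => some (PySem.List.pyGetD (PySem.List.pyGetD A 0 []) j 0))
  let prev0 := (PySem.List.pyRange 0 m 1).map (fun _ => (-1 : Int))
  (PySem.List.pyRange 1 n 1).foldl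
    (fun st i =>
      let dprev := PySem.List.pyGetD st.1 (i - 1) []
      let rp := pvRowA dprev (PySem.List.pyGetD A i []) m
      (st.1 ++ [rp.1], st.2 ++ [rp.2]))
    ([dp0], [prev0])

-- Python's min over a list of (possibly inf) values: first minimal element
def pvMinInf : List (Option Int) → Option Int
  | [] => none
  | x :: rest => rest.foldl (fun acc y => if pvLtInf y acc then y else acc) x

-- the while loop (current_row counts down from n-1 to 0); entries in append order
def pvTraceA (prev : List (List Int)) : Nat → Int → List (Int × Int)
  | 0, col => [(1, col + 1)]
  | Nat.succ r, col =>
      ((r : Int) + 2, col + 1) ::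
        pvTraceA prev r
          (PySem.List.pyGetD (PySem.List.pyGetD prev ((r : Int) + 1) []) col 0)

def min_penalty_path_with_trace (A : List (List Int)) : Int × (List (Int × Int)) :=
  let n : Int := A.length
  let m : Int := (PySem.List.pyGetD A 0 []).length
  let tabs := pvTablesA A n m
  let last := PySem.List.pyGetD tabs.1 (n - 1) []
  let mp := pvMinInf last
  let mi : Int := ((PySem.List.index? last mp).getD 0 : Nat)
  (mp.getD 0, (pvTraceA tabs.2 (A.length - 1) mi).reverse)

-- ===== PORT B =====
def pvMinInt : List Int → Int
  | [] => 0
  | x :: rest => rest.foldl min x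

-- one dp row of B: window minimum of the previous row plus the cell penalty
def pvRowB (dprev rowi : List Int) (m : Int) : List Int :=
  (PySem.List.pyRange 0 m 1).map (fun j =>
    PySem.List.pyGetD rowi j 0 +
      pvMinInt ((PySem.List.pyRange (max 0 (j - 1)) (min m (j + 2)) 1).map
        (fun k => PySem.List.pyGetD dprev k 0)))

def pvTablesB (A : List (List Int)) (n m : Int) : List (List Int) :=
  (PySem.List.pyRange 1 n 1).foldl
    (fun dp i =>
      dp ++ [pvRowB (PySem.List.pyGetD dp (-1) []) (PySem.List.pyGetD A i []) m])
    [PySem.List.pyGetD A 0 []]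

-- the backward loop `for i in range(n-1, 0, -1)` rescanning dp; entries in append order
def pvBackB (dp Arows : List (List Int)) (m : Int) : Nat → Int → List (Int × Int)
  | 0, _ => []
  | Nat.succ r, j =>
      let i : Int := (r : Int) + 1
      let target := PySem.List.pyGetD (PySem.List.pyGetD dp i []) j 0 -
        PySem.List.pyGetD (PySem.List.pyGetD Arows i []) j 0
      let j' := match (PySem.List.pyRange (max 0 (j - 1)) (min m (j + 2)) 1).find?
          (fun k => PySem.List.pyGetD (PySem.List.pyGetD dp (i - 1) []) k 0 == target) with
        | some k => k
        | none => j
      (i, j' + 1) :: pvBackB dp Arows m r j'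

def min_penalty_path_with_trace_alt (A : List (List Int)) : Int × (List (Int × Int)) :=
  let n : Int := A.length
  let m : Int := (PySem.List.pyGetD A 0 []).length
  let dp := pvTablesB A n m
  let last := PySem.List.pyGetD dp (-1) []
  let mp := pvMinInt last
  let j0 : Int := ((PySem.List.index? last mp).getD 0 : Nat)
  (mp, ((n, j0 + 1) :: pvBackB dp A m (A.length - 1) j0).reverse)

-- ===== PRECONDITION & SPEC =====
-- Pre_ excludes exactly the inputs on which the Python A raises: an empty list (IndexError on
-- A[0]), an empty first row (ValueError: min of empty), and a later row shorter than the first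
-- (IndexError on A[i][j]); B raises on exactly the same inputs.
def Pre_min_penalty_path_with_trace (A : List (List Int)) : Prop :=
  A ≠ [] ∧ A.headD [] ≠ [] ∧ ∀ row ∈ A, (A.headD []).length ≤ row.length
instance (A : List (List Int)) : Decidable (Pre_min_penalty_path_with_trace A) := by
  unfold Pre_min_penalty_path_with_trace; infer_instance

def pvWitness_min_penalty_path_with_trace : List (List Int) := [[1, 2], [3, 4]]

def Spec_min_penalty_path_with_trace (A : List (List Int)) (out : Int × (List (Int × Int))) : Prop := out = min_penalty_path_with_trace_alt A
instance (A : List (List Int)) (out : Int × (List (Int × Int))) : Decidable (Spec_min_penalty_path_with_trace A out) := by unfold Spec_min_penalty_path_with_trace; infer_instance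

-- ===== CLAIM (what is proved, stated in full; the proofs are below) =====
def Claim_equal_min_penalty_path_with_trace : Prop := ∀ (A : List (List Int)), Dom_min_penalty_path_with_trace A → Pre_min_penalty_path_with_trace A → Spec_min_penalty_path_with_trace A (min_penalty_path_with_trace A)


-- ===== LEMMAS AND PROOFS =====

-- Python's < with inf on wrapped ints
theorem pvLtInf_some_some (u v : Int) : pvLtInf (some u) (some v) = decide (u < v) := rfl

-- Python's min over wrapped ints is the plain running minimum
theorem pvMinAux (xs : List Int) : ∀ (x : Int),
    (xs.map some).foldl (fun acc y => if pvLtInf y acc then y else acc) (some x) =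
      some (xs.foldl min x) := by
  induction xs with
  | nil => intro x; rfl
  | cons y ys ih =>
    intro x
    simp only [List.map_cons, List.foldl_cons]
    have h : (if pvLtInf (some y) (some x) then (some y : Option Int) else some x) = some (min x y) := by
      rw [pvLtInf_some_some]
      by_cases hyx : y < x <;> simp [hyx] <;> omega
    rw [h]
    exact ih (min x y)

theorem pvMinInf_map_some (x : Int) (xs : List Int) :
    pvMinInf ((x :: xs).map some) = some (pvMinInt (x :: xs)) := by
  simpa [pvMinInf, pvMinInt] using pvMinAux xs x

-- first index of a wrapped value is the first index of the value
theorem index?_map_some (xs : List Int) (v : Int) :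
    PySem.List.index? (xs.map some) (some v) = PySem.List.index? xs v := by
  induction xs with
  | nil => rfl
  | cons x t ih =>
    simp only [List.map_cons]
    by_cases hx : x = v
    · subst hx
      rw [PySem.List.index?_cons_self, PySem.List.index?_cons_self]
    · rw [PySem.List.index?_cons_of_ne t hx,
        PySem.List.index?_cons_of_ne (t.map some) (by simpa using hx), ih]

-- the running Int minimum is a member
theorem pvMinInt_mem (x : Int) (xs : List Int) : pvMinInt (x :: xs) ∈ x :: xs := by
  simp only [pvMinInt]
  rcases PySem.List.foldl_min_mem xs x with h | h
  · rw [h]; exact List.mem_cons_self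
  · exact List.mem_cons_of_mem _ h

-- a lower bound that is attained is the running minimum
theorem pvMinInt_eq_of (x : Int) (xs : List Int) (v : Int)
    (hmem : v ∈ x :: xs) (hlb : ∀ y ∈ x :: xs, v ≤ y) :
    pvMinInt (x :: xs) = v := by
  have hle := PySem.List.foldl_min_le xs x
  have h1 : xs.foldl min x ≤ v := by
    rcases List.mem_cons.1 hmem with h | h
    · rw [h]; exact hle.1
    · exact hle.2 v h
  have h2 : v ≤ xs.foldl min x := hlb _ (pvMinInt_mem x xs)
  simp only [pvMinInt]
  omega

-- the strict-< update step of A's inner loop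
theorem pvFold_step (g : Int → Int) (a p k : Int) :
    (if pvLtInf (some (g k + a)) (some (g p + a)) then ((some (g k + a) : Option Int), k)
     else (some (g p + a), p))
    = if g k < g p then ((some (g k + a) : Option Int), k) else (some (g p + a), p) := by
  rw [pvLtInf_some_some]
  by_cases h : g k < g p
  · rw [if_pos (by simp; omega), if_pos h]
  · rw [if_neg (by simp; omega), if_neg h]

-- the strict-improvement fold, started from an already-achieved state
theorem pvFoldAux (g : Int → Int) (a : Int) :
    ∀ (ks : List Int) (p : Int),
      ∃ q, (ks.foldl
            (fun st k => if pvLtInf (some (g k + a)) st.1 then (some (g k + a), k) else st)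
            ((some (g p + a) : Option Int), p)) = (some (g q + a), q)
        ∧ (q = p ∨ q ∈ ks)
        ∧ g q ≤ g p
        ∧ (∀ k ∈ ks, g q ≤ g k)
        ∧ (g q = g p → q = p)
        ∧ (g q < g p → ks.find? (fun k => g k == g q) = some q) := by
  intro ks
  induction ks with
  | nil =>
    intro p
    exact ⟨p, rfl, Or.inl rfl, le_refl _, by simp, fun _ => rfl,
      fun h => absurd h (lt_irrefl _)⟩
  | cons k t ih =>
    intro p
    simp only [List.foldl_cons]
    rw [pvFold_step]
    by_cases hk : g k < g p
    · rw [if_pos hk]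
      obtain ⟨q, hfold, hqmem, hqle, hlb, htie, hfind⟩ := ih k
      refine ⟨q, hfold, ?_, ?_, ?_, ?_, ?_⟩
      · rcases hqmem with h | h
        · exact Or.inr (h ▸ List.mem_cons_self)
        · exact Or.inr (List.mem_cons_of_mem _ h)
      · omega
      · intro k' hk'
        rcases List.mem_cons.1 hk' with h | h
        · rw [h]; exact hqle
        · exact hlb _ h
      · intro h; omega
      · intro _
        by_cases heq : g q = g k
        · have hq : q = k := htie heq
          rw [List.find?_cons_of_pos (by simp [heq.symm])]
          rw [hq]
        · have hlt : g q < g k := lt_of_le_of_ne hqle heq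
          rw [List.find?_cons_of_neg (by simp; omega)]
          exact hfind hlt
    · rw [if_neg hk]
      obtain ⟨q, hfold, hqmem, hqle, hlb, htie, hfind⟩ := ih p
      refine ⟨q, hfold, ?_, hqle, ?_, htie, ?_⟩
      · rcases hqmem with h | h
        · exact Or.inl h
        · exact Or.inr (List.mem_cons_of_mem _ h)
      · intro k' hk'
        rcases List.mem_cons.1 hk' with h | h
        · rw [h]; omega
        · exact hlb _ h
      · intro hlt
        rw [List.find?_cons_of_neg (by simp; omega)]
        exact hfind hlt

-- the strict-improvement fold from (inf, -1): value, first-argmin tie-break, find? form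
theorem pvFoldMain (g : Int → Int) (a : Int) (k0 : Int) (ks : List Int) :
    ∃ q, ((k0 :: ks).foldl
            (fun st k => if pvLtInf (some (g k + a)) st.1 then (some (g k + a), k) else st)
            ((none : Option Int), -1)) = (some (g q + a), q)
      ∧ q ∈ k0 :: ks
      ∧ (∀ k ∈ k0 :: ks, g q ≤ g k)
      ∧ (k0 :: ks).find? (fun k => g k == g q) = some q := by
  simp only [List.foldl_cons]
  rw [if_pos (show pvLtInf (some (g k0 + a)) none = true from rfl)]
  obtain ⟨q, hfold, hqmem, hqle, hlb, htie, hfind⟩ := pvFoldAux g a ks k0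
  refine ⟨q, hfold, ?_, ?_, ?_⟩
  · rcases hqmem with h | h
    · exact h ▸ List.mem_cons_self
    · exact List.mem_cons_of_mem _ h
  · intro k' hk'
    rcases List.mem_cons.1 hk' with h | h
    · rw [h]; exact hqle
    · exact hlb _ h
  · by_cases heq : g q = g k0
    · have hq : q = k0 := htie heq
      rw [List.find?_cons_of_pos (by simp [heq.symm])]
      rw [hq]
    · have hlt : g q < g k0 := lt_of_le_of_ne hqle heq
      rw [List.find?_cons_of_neg (by simp; omega)]
      exact hfind hlt

-- one cell of A against the corresponding cell of B (window = pyRange lo hi)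
theorem pvCell_corr (dprev : List Int) (a j m : Int)
    (hm : (dprev.length : Int) = m) (h0 : 0 ≤ j) (hjm : j < m) :
    (pvCellA (dprev.map some) m a j).1 =
        some (a + pvMinInt ((PySem.List.pyRange (max 0 (j - 1)) (min m (j + 2)) 1).map
          (fun k => PySem.List.pyGetD dprev k 0)))
    ∧ (pvCellA (dprev.map some) m a j).2 ∈ PySem.List.pyRange (max 0 (j - 1)) (min m (j + 2)) 1
    ∧ (PySem.List.pyRange (max 0 (j - 1)) (min m (j + 2)) 1).find?
        (fun k => PySem.List.pyGetD dprev k 0 ==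
          pvMinInt ((PySem.List.pyRange (max 0 (j - 1)) (min m (j + 2)) 1).map
            (fun k => PySem.List.pyGetD dprev k 0))) = some (pvCellA (dprev.map some) m a j).2 := by
  have hjmem : j ∈ PySem.List.pyRange (max 0 (j - 1)) (min m (j + 2)) 1 := by
    rw [PySem.List.mem_pyRange_one]; omega
  have hcong : pvCellA (dprev.map some) m a j =
      (PySem.List.pyRange (max 0 (j - 1)) (min m (j + 2)) 1).foldl
        (fun st k => if pvLtInf (some ((fun k => PySem.List.pyGetD dprev k 0) k + a)) st.1
          then (some ((fun k => PySem.List.pyGetD dprev k 0) k + a), k) else st)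
        ((none : Option Int), -1) := by
    simp only [pvCellA]
    apply PySem.List.foldl_congr_mem
    intro acc k hkmem
    have hk := PySem.List.mem_pyRange_one.1 hkmem
    have hk0 : 0 ≤ k := by omega
    have hk1 : k < ((dprev.map some).length : Int) := by simp; omega
    rw [PySem.List.pyGetD_eq_getElem _ none hk0 hk1]
    rw [List.getElem_map]
    rw [show PySem.List.pyGetD dprev k 0 = dprev[k.toNat]'(by
      have : k < (dprev.length : Int) := by omega
      omega) from PySem.List.pyGetD_eq_getElem dprev 0 hk0 (by omega)]
    rfl
  obtain ⟨k0, rest, hks⟩ := List.exists_cons_of_ne_nil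
    (show PySem.List.pyRange (max 0 (j - 1)) (min m (j + 2)) 1 ≠ [] from by
      intro h; rw [h] at hjmem; exact absurd hjmem (List.not_mem_nil))
  rw [hks] at hcong ⊢
  obtain ⟨q, hfold, hqmem, hlb, hfind⟩ :=
    pvFoldMain (fun k => PySem.List.pyGetD dprev k 0) a k0 rest
  have hmin : pvMinInt ((k0 :: rest).map (fun k => PySem.List.pyGetD dprev k 0)) =
      PySem.List.pyGetD dprev q 0 := by
    rw [List.map_cons]
    apply pvMinInt_eq_of
    · exact (show PySem.List.pyGetD dprev q 0 ∈
          List.map (fun k => PySem.List.pyGetD dprev k 0) (k0 :: rest) from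
        List.mem_map.2 ⟨q, hqmem, rfl⟩)
    · intro y hy
      obtain ⟨k, hkmem, hky⟩ := List.mem_map.1
        (show y ∈ List.map (fun k => PySem.List.pyGetD dprev k 0) (k0 :: rest) from hy)
      rw [← hky]
      exact hlb k hkmem
  refine ⟨?_, ?_, ?_⟩
  · rw [hcong, hfold, hmin]; simp [add_comm]
  · rw [hcong, hfold]; exact hqmem
  · rw [hcong, hfold, hmin]
    simpa using hfind


-- indexing helpers for appended tables
theorem pvGetD_append_lt {α : Type} (xs ys : List α) (t : Nat) (d : α) (h : t < xs.length) :
    PySem.List.pyGetD (xs ++ ys) (t : Int) d = PySem.List.pyGetD xs (t : Int) d := by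
  rw [PySem.List.pyGetD_natCast, PySem.List.pyGetD_natCast,
    List.getD_eq_getElem?_getD, List.getD_eq_getElem?_getD, List.getElem?_append_left h]

theorem pvGetD_append_self {α : Type} (xs : List α) (y : α) (d : α) :
    PySem.List.pyGetD (xs ++ [y]) (xs.length : Int) d = y := by
  rw [PySem.List.pyGetD_natCast, List.getD_eq_getElem?_getD, List.getElem?_concat_length]
  rfl

theorem pvGetD_neg_one_eq {α : Type} (xs : List α) (c : Nat) (d : α) (h : xs.length = c + 1) :
    PySem.List.pyGetD xs (-1) d = PySem.List.pyGetD xs (c : Int) d := by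
  have hne : xs ≠ [] := by intro hx; rw [hx] at h; simp at h
  rw [PySem.List.pyGetD_neg_one xs d hne, PySem.List.pyGetD_natCast,
    List.getD_eq_getElem xs d (by omega : c < xs.length), List.getLast_eq_getElem]
  simp [h]

-- row-level correspondence: A's dp/prev row against B's dp row and back-step scan
theorem pvRow_corr (dprev rowi : List Int) (m : Nat) (hm : dprev.length = m) :
    (pvRowA (dprev.map some) rowi (m : Int)).1 = (pvRowB dprev rowi (m : Int)).map some
    ∧ (pvRowB dprev rowi (m : Int)).length = m
    ∧ ∀ j : Int, 0 ≤ j → j < (m : Int) →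
        (PySem.List.pyGetD (pvRowA (dprev.map some) rowi (m : Int)).2 j 0 ∈
           PySem.List.pyRange (max 0 (j - 1)) (min (m : Int) (j + 2)) 1)
        ∧ (PySem.List.pyRange (max 0 (j - 1)) (min (m : Int) (j + 2)) 1).find?
            (fun k => PySem.List.pyGetD dprev k 0 ==
              PySem.List.pyGetD (pvRowB dprev rowi (m : Int)) j 0 - PySem.List.pyGetD rowi j 0)
            = some (PySem.List.pyGetD (pvRowA (dprev.map some) rowi (m : Int)).2 j 0) := by
  have hmI : ((dprev.length : Nat) : Int) = (m : Int) := by rw [hm]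
  refine ⟨?_, ?_, ?_⟩
  · simp only [pvRowA, pvRowB]
    rw [List.map_map, List.map_map]
    apply List.map_congr_left
    intro j hj
    have hjb := PySem.List.mem_pyRange_one.1 hj
    have h1 := (pvCell_corr dprev (PySem.List.pyGetD rowi j 0) j (m : Int) hmI
      (by omega) (by omega)).1
    simpa using h1
  · simp only [pvRowB]
    rw [List.length_map, PySem.List.length_pyRange_one]
    omega
  · intro j hj0 hjm
    have hA2 : PySem.List.pyGetD (pvRowA (dprev.map some) rowi (m : Int)).2 j 0
        = (pvCellA (dprev.map some) (m : Int) (PySem.List.pyGetD rowi j 0) j).2 := by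
      simp only [pvRowA]
      rw [List.map_map]
      exact PySem.List.pyGetD_map_pyRange_of_nonneg _ (m : Int) j 0 hj0 hjm
    have hB : PySem.List.pyGetD (pvRowB dprev rowi (m : Int)) j 0
        = PySem.List.pyGetD rowi j 0 +
            pvMinInt ((PySem.List.pyRange (max 0 (j - 1)) (min (m : Int) (j + 2)) 1).map
              (fun k => PySem.List.pyGetD dprev k 0)) := by
      simp only [pvRowB]
      exact PySem.List.pyGetD_map_pyRange_of_nonneg _ (m : Int) j 0 hj0 hjm
    obtain ⟨h1, h2, h3⟩ := pvCell_corr dprev (PySem.List.pyGetD rowi j 0) j (m : Int) hmI hj0 hjm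
    constructor
    · rw [hA2]; exact h2
    · rw [hA2]
      simp only [hB]
      have harith : ∀ x : Int,
          PySem.List.pyGetD rowi j 0 + x - PySem.List.pyGetD rowi j 0 = x := by intro x; ring
      simp only [harith]
      exact h3

-- the per-row link used by the path reconstruction
def pvLink (A : List (List Int)) (m : Nat) (dpB prevA : List (List Int)) (t : Nat) (j : Int) : Prop :=
  PySem.List.pyGetD (PySem.List.pyGetD prevA (t : Int) []) j 0 ∈
      PySem.List.pyRange (max 0 (j - 1)) (min (m : Int) (j + 2)) 1
  ∧ (PySem.List.pyRange (max 0 (j - 1)) (min (m : Int) (j + 2)) 1).find?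
      (fun k => PySem.List.pyGetD (PySem.List.pyGetD dpB ((t : Int) - 1) []) k 0 ==
        PySem.List.pyGetD (PySem.List.pyGetD dpB (t : Int) []) j 0 -
          PySem.List.pyGetD (PySem.List.pyGetD A (t : Int) []) j 0)
    = some (PySem.List.pyGetD (PySem.List.pyGetD prevA (t : Int) []) j 0)

def pvInv (A : List (List Int)) (m : Nat) (c : Nat)
    (st : List (List (Option Int)) × List (List Int)) (dpB : List (List Int)) : Prop :=
  st.1 = dpB.map (List.map some) ∧ dpB.length = c + 1 ∧ st.2.length = c + 1
  ∧ (∀ row ∈ dpB, row.length = m)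
  ∧ ∀ t : Nat, 1 ≤ t → t ≤ c → ∀ j : Int, 0 ≤ j → j < (m : Int) → pvLink A m dpB st.2 t j

theorem pvTablesA_one (A : List (List Int)) (m : Int) :
    pvTablesA A 1 m =
      ([(PySem.List.pyRange 0 m 1).map
          (fun j => some (PySem.List.pyGetD (PySem.List.pyGetD A 0 []) j 0))],
       [(PySem.List.pyRange 0 m 1).map (fun _ => (-1 : Int))]) := by
  simp only [pvTablesA]
  rw [PySem.List.pyRange_one_eq_nil (by omega : (1 : Int) ≤ 1)]
  rfl

theorem pvTablesB_one (A : List (List Int)) (m : Int) :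
    pvTablesB A 1 m = [PySem.List.pyGetD A 0 []] := by
  simp only [pvTablesB]
  rw [PySem.List.pyRange_one_eq_nil (by omega : (1 : Int) ≤ 1)]
  rfl

theorem pvTablesA_succ (A : List (List Int)) (m : Int) (c : Nat) :
    pvTablesA A ((c : Int) + 1 + 1) m =
      ((pvTablesA A ((c : Int) + 1) m).1 ++
          [(pvRowA (PySem.List.pyGetD (pvTablesA A ((c : Int) + 1) m).1 ((c : Int) + 1 - 1) [])
              (PySem.List.pyGetD A ((c : Int) + 1) []) m).1],
       (pvTablesA A ((c : Int) + 1) m).2 ++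
          [(pvRowA (PySem.List.pyGetD (pvTablesA A ((c : Int) + 1) m).1 ((c : Int) + 1 - 1) [])
              (PySem.List.pyGetD A ((c : Int) + 1) []) m).2]) := by
  simp only [pvTablesA]
  rw [PySem.List.pyRange_one_succ_right (by omega : (1 : Int) ≤ (c : Int) + 1),
    List.foldl_append]
  rfl

theorem pvTablesB_succ (A : List (List Int)) (m : Int) (c : Nat) :
    pvTablesB A ((c : Int) + 1 + 1) m =
      pvTablesB A ((c : Int) + 1) m ++
        [pvRowB (PySem.List.pyGetD (pvTablesB A ((c : Int) + 1) m) (-1) [])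
          (PySem.List.pyGetD A ((c : Int) + 1) []) m] := by
  simp only [pvTablesB]
  rw [PySem.List.pyRange_one_succ_right (by omega : (1 : Int) ≤ (c : Int) + 1),
    List.foldl_append]
  rfl

theorem pvGetD_append_idx {α : Type} (xs : List α) (y : α) (d : α) (i : Int)
    (h : i = (xs.length : Int)) : PySem.List.pyGetD (xs ++ [y]) i d = y := by
  rw [h, pvGetD_append_self]

theorem pvGetD_append_lt' {α : Type} (xs ys : List α) (i : Int) (d : α)
    (h0 : 0 ≤ i) (h : i < (xs.length : Int)) :
    PySem.List.pyGetD (xs ++ ys) i d = PySem.List.pyGetD xs i d := by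
  rw [show i = ((i.toNat : Nat) : Int) by omega]
  rw [pvGetD_append_lt xs ys i.toNat d (by omega)]

theorem pvDp0_eq (r0 : List Int) :
    (PySem.List.pyRange 0 ((r0.length : Nat) : Int) 1).map
        (fun j => some (PySem.List.pyGetD r0 j 0)) = r0.map some := by
  rw [show (fun j => some (PySem.List.pyGetD r0 j 0))
      = (some ∘ fun j => PySem.List.pyGetD r0 j 0) from rfl, ← List.map_map]
  congr 1
  have h := PySem.List.map_pyGetD_pyRange_zero r0 0
  rw [PySem.List.len_eq] at h
  exact h

-- the main table invariant: A's dp is B's dp wrapped in `some`, and A's prev entries are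
-- exactly what B's backward scan recomputes
theorem pvTables_inv (r0 : List Int) (rest : List (List Int)) (m : Nat) (hm : r0.length = m) :
    ∀ c : Nat, c < (r0 :: rest).length →
      pvInv (r0 :: rest) m c (pvTablesA (r0 :: rest) ((c : Int) + 1) (m : Int))
        (pvTablesB (r0 :: rest) ((c : Int) + 1) (m : Int)) := by
  intro c
  induction c with
  | zero =>
    intro _
    rw [show ((0 : Nat) : Int) + 1 = 1 by norm_num]
    rw [pvTablesA_one, pvTablesB_one]
    simp only [PySem.List.pyGetD_zero_cons]
    refine ⟨?_, rfl, rfl, ?_, ?_⟩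
    · rw [List.map_cons, List.map_nil, ← hm, pvDp0_eq]
    · intro row hrow
      rw [List.mem_singleton] at hrow
      rw [hrow, hm]
    · intro t ht1 ht0
      omega
  | succ c ih =>
    intro hc
    have hcl : c < (r0 :: rest).length := by omega
    obtain ⟨hmap, hlenB, hlenP, hrowlen, hlink⟩ := ih hcl
    rw [show ((c + 1 : Nat) : Int) + 1 = ((c : Int) + 1) + 1 by push_cast; ring]
    rw [pvTablesA_succ, pvTablesB_succ]
    set TA := pvTablesA (r0 :: rest) ((c : Int) + 1) (m : Int) with hTA
    set dpB := pvTablesB (r0 :: rest) ((c : Int) + 1) (m : Int) with hdpB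
    set rowi := PySem.List.pyGetD (r0 :: rest) ((c : Int) + 1) [] with hrowi
    have hlast : PySem.List.pyGetD TA.1 ((c : Int) + 1 - 1) [] = (dpB.getD c []).map some := by
      rw [show (c : Int) + 1 - 1 = ((c : Nat) : Int) by ring]
      rw [hmap, PySem.List.pyGetD_natCast,
        List.getD_eq_getElem _ _ (by rw [List.length_map]; omega), List.getElem_map,
        List.getD_eq_getElem _ _ (by omega)]
    have hlastB : PySem.List.pyGetD dpB (-1) [] = dpB.getD c [] := by
      rw [pvGetD_neg_one_eq _ c [] hlenB, PySem.List.pyGetD_natCast]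
    have hLmem : dpB.getD c [] ∈ dpB := by
      rw [List.getD_eq_getElem _ _ (by omega)]
      exact List.getElem_mem _
    have hLlen : (dpB.getD c []).length = m := hrowlen _ hLmem
    obtain ⟨hr1, hr2, hr3⟩ := pvRow_corr (dpB.getD c []) rowi m hLlen
    unfold pvInv
    dsimp only
    simp only [hlast, hlastB]
    refine ⟨?_, ?_, ?_, ?_, ?_⟩
    · rw [List.map_append, hmap, hr1]
      simp
    · simp [hlenB]
    · simp [hlenP]
    · intro row hrow
      rcases List.mem_append.1 hrow with h | h
      · exact hrowlen _ h
      · rw [List.mem_singleton] at h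
        rw [h]
        exact hr2
    · intro t ht1 htc j hj0 hjm
      unfold pvLink
      by_cases htop : t = c + 1
      · subst htop
        simp only [Nat.cast_add, Nat.cast_one]
        have hP := pvGetD_append_idx TA.2
          (pvRowA ((dpB.getD c []).map some) rowi (m : Int)).2 [] ((c : Int) + 1)
          (by rw [hlenP]; push_cast; ring)
        have hD1 := pvGetD_append_idx dpB
          (pvRowB (dpB.getD c []) rowi (m : Int)) [] ((c : Int) + 1)
          (by rw [hlenB]; push_cast; ring)
        have hD0 := pvGetD_append_lt' dpB
          [pvRowB (dpB.getD c []) rowi (m : Int)] ((c : Int) + 1 - 1) []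
          (by omega) (by rw [hlenB]; push_cast; omega)
        simp only [hP, hD1, hD0]
        simp only [show (c : Int) + 1 - 1 = ((c : Nat) : Int) from by ring,
          PySem.List.pyGetD_natCast]
        exact hr3 j hj0 hjm
      · have hl := hlink t ht1 (by omega) j hj0 hjm
        unfold pvLink at hl
        have e1 := pvGetD_append_lt TA.2
          [(pvRowA ((dpB.getD c []).map some) rowi (m : Int)).2] t [] (by omega)
        have e2 := pvGetD_append_lt dpB
          [pvRowB (dpB.getD c []) rowi (m : Int)] t [] (by omega)
        have e3 := pvGetD_append_lt' dpB
          [pvRowB (dpB.getD c []) rowi (m : Int)] ((t : Int) - 1) []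
          (by omega) (by rw [hlenB]; push_cast; omega)
        simp only [e1, e2, e3]
        exact hl

-- A's prev-chain walk equals B's dp rescan walk
theorem pvTrace_corr (A dpB prevA : List (List Int)) (m : Nat) :
    ∀ r : Nat,
      (∀ t : Nat, 1 ≤ t → t ≤ r → ∀ j : Int, 0 ≤ j → j < (m : Int) → pvLink A m dpB prevA t j) →
      ∀ col : Int, 0 ≤ col → col < (m : Int) →
        pvTraceA prevA r col = ((r : Int) + 1, col + 1) :: pvBackB dpB A (m : Int) r col := by
  intro r
  induction r with
  | zero =>
    intro _ col _ _
    simp [pvTraceA, pvBackB]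
  | succ r ih =>
    intro hlink col hcol0 hcolm
    obtain ⟨hmem, hfind⟩ := hlink (r + 1) (by omega) (by omega) col hcol0 hcolm
    simp only [show ((r + 1 : Nat) : Int) = (r : Int) + 1 from by push_cast; ring] at hmem hfind
    have hbmem := PySem.List.mem_pyRange_one.1 hmem
    simp only [pvTraceA, pvBackB]
    rw [hfind]
    rw [ih (fun t h1 h2 => hlink t h1 (by omega))
      (PySem.List.pyGetD (PySem.List.pyGetD prevA ((r : Int) + 1) []) col 0)
      (by omega) (by omega)]
    simp only [show ((r + 1 : Nat) : Int) + 1 = (r : Int) + 2 from by push_cast; ring]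

-- ===== VERDICT (by name: the statement is the Claim_ definition above) =====
theorem min_penalty_path_with_trace_spec : Claim_equal_min_penalty_path_with_trace := by
  unfold Claim_equal_min_penalty_path_with_trace
  intro A _ hpre
  unfold Spec_min_penalty_path_with_trace
  obtain ⟨hne, hh, hrows⟩ := hpre
  obtain ⟨r0, rest, rfl⟩ := List.exists_cons_of_ne_nil hne
  simp only [List.headD_cons] at hh hrows
  have hmpos : 0 < r0.length := List.length_pos_of_ne_nil hh
  obtain ⟨hmap, hlenB, hlenP, hrowlen, hlink⟩ :=
    pvTables_inv r0 rest r0.length rfl rest.length (by simp)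
  simp only [min_penalty_path_with_trace, min_penalty_path_with_trace_alt,
    PySem.List.pyGetD_zero_cons]
  rw [show ((r0 :: rest).length : Int) = (rest.length : Int) + 1 from by
    simp [List.length_cons]]
  rw [show (r0 :: rest).length - 1 = rest.length from by simp]
  set TA := pvTablesA (r0 :: rest) ((rest.length : Int) + 1) ((r0.length : Int)) with hTA
  set dpB := pvTablesB (r0 :: rest) ((rest.length : Int) + 1) ((r0.length : Int)) with hdpB
  have hlastA : PySem.List.pyGetD TA.1 ((rest.length : Int) + 1 - 1) []
      = (dpB.getD rest.length []).map some := by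
    rw [show (rest.length : Int) + 1 - 1 = ((rest.length : Nat) : Int) by ring]
    rw [hmap, PySem.List.pyGetD_natCast,
      List.getD_eq_getElem _ _ (by rw [List.length_map]; omega), List.getElem_map,
      List.getD_eq_getElem _ _ (by omega)]
  have hlastB : PySem.List.pyGetD dpB (-1) [] = dpB.getD rest.length [] := by
    rw [pvGetD_neg_one_eq _ rest.length [] hlenB, PySem.List.pyGetD_natCast]
  have hLlen : (dpB.getD rest.length []).length = r0.length := by
    apply hrowlen
    rw [List.getD_eq_getElem _ _ (by omega)]
    exact List.getElem_mem _
  obtain ⟨x, xs, hLx⟩ := List.exists_cons_of_ne_nil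
    (show dpB.getD rest.length [] ≠ [] from by
      intro h; rw [h] at hLlen; simp at hLlen; omega)
  rw [hlastA, hlastB, hLx, pvMinInf_map_some, index?_map_some]
  simp only [Option.getD_some]
  have hmemv := pvMinInt_mem x xs
  obtain ⟨k, hk⟩ := Option.isSome_iff_exists.1 ((PySem.List.index?_isSome_iff _ _).2 hmemv)
  obtain ⟨hkb, -, -⟩ := PySem.List.getElem_of_index?_eq_some hk
  have hkm : k < r0.length := by
    have hxl : (x :: xs).length = r0.length := by rw [← hLx, hLlen]
    omega
  rw [hk]
  simp only [Option.getD_some]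
  rw [pvTrace_corr (r0 :: rest) dpB TA.2 r0.length rest.length hlink
    ((k : Nat) : Int) (by omega) (by exact_mod_cast hkm)]
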